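-- pv_equiv track=rewrite | github.com/tarobins/aoc2023 | 7/a.py | has_five_of_a_kind
-- ===== SOURCE A (Python) =====
-- def has_five_of_a_kind(hand):
--     cards = dict()
--     j_count = 0
--     for card in hand:
--         if card == 'J':
--             j_count += 1
--             continue
--         if card in cards:
--             cards[card] += 1
--         else:
--             cards[card] = 1
--     if 5 in cards.values():
--         return True
--     if 4 in cards.values() and j_count > 0:
--         return True
--     if 3 in cards.values() and j_count > 1:
--         return True
--     if 2 in cards.values() and j_count > 2:
--         return True
--     if j_count > 3:
--         return True
-- ===== SOURCE B (Python) =====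
-- def has_five_of_a_kind(hand):
--     rest = sorted(c for c in hand if c != 'J')
--     jokers = len(hand) - len(rest)
--     if jokers > 3:
--         return True
--     runs = []
--     for c in rest:
--         if runs and runs[-1][0] == c:
--             runs[-1][1] += 1
--         else:
--             runs.append([c, 1])
--     for _, n in runs:
--         if 5 - jokers <= n <= 5:
--             return True
-- ===== Notes on version B (the rewrite author's own statement) =====
-- stated objective: alternative
-- what changed: Replaces A's hash-style count dict plus five separate membership scans over its values with a sort-then-scan algorithm: sort the non-J cards, run-length-encode the sorted list, and make one interval test 5 - jokers <= run <= 5 over the runs (correct because in a sorted list each card's occurrences form one contiguous run whose length is its count).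
import Mathlib
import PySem

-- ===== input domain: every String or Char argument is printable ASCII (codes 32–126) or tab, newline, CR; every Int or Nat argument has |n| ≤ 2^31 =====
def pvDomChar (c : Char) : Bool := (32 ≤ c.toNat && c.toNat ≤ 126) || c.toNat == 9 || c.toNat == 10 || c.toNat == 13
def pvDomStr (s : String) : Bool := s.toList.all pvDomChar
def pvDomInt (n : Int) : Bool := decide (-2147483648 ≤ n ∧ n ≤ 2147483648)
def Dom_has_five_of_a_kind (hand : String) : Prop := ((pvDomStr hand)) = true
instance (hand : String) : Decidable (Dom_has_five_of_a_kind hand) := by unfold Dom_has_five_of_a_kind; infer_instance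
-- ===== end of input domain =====

-- B replaces A's count-dict plus five membership scans over its values by sort-then-scan:
-- sort the non-'J' cards, run-length-encode the sorted list, one interval test over the runs
-- (objective: alternative algorithm, not claimed faster).


-- ===== PORT A =====
def has_five_of_a_kind (hand : String) : Option Bool :=
  let st := hand.toList.foldl
    (fun (st : PySem.Dict Char Int × Int) card =>
      if card = 'J' then (st.1, st.2 + 1)
      else if st.1.contains card then (st.1.modify card 0 (· + 1), st.2)
      else (st.1.insert card 1, st.2))
    (PySem.Dict.empty, 0)
  let cards := st.1
  let j_count := st.2
  if cards.values.contains 5 then some true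
  else if cards.values.contains 4 && j_count > 0 then some true
  else if cards.values.contains 3 && j_count > 1 then some true
  else if cards.values.contains 2 && j_count > 2 then some true
  else if j_count > 3 then some true
  else none

-- ===== PORT B =====
-- one step of Source B's run-length-encoding loop; the runs list is kept reversed
-- (Lean lists cons at the front where Python appends/mutates at the end) and is
-- reversed back before the final scan.
def runStep (runs : List (Char × Int)) (c : Char) : List (Char × Int) :=
  match runs with
  | (c0, n) :: rs => if c0 = c then (c0, n + 1) :: rs else (c, 1) :: (c0, n) :: rs
  | [] => [(c, 1)]

def has_five_of_a_kind_alt (hand : String) : Option Bool :=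
  let rest := PySem.List.sorted (hand.toList.filter (fun c => c ≠ 'J')) (fun c => c) false
  let jokers : Int := (hand.toList.length : Int) - (rest.length : Int)
  if jokers > 3 then some true
  else if (rest.foldl runStep []).reverse.any
      (fun p => decide (5 - jokers ≤ p.2) && decide (p.2 ≤ 5)) then some true
  else none

-- ===== PRECONDITION & SPEC =====
def Spec_has_five_of_a_kind (hand : String) (out : Option Bool) : Prop := out = has_five_of_a_kind_alt hand
instance (hand : String) (out : Option Bool) : Decidable (Spec_has_five_of_a_kind hand out) := by unfold Spec_has_five_of_a_kind; infer_instance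

-- ===== CLAIM (what is proved, stated in full; the proofs are below) =====
def Claim_equal_has_five_of_a_kind : Prop := ∀ (hand : String), Dom_has_five_of_a_kind hand → Spec_has_five_of_a_kind hand (has_five_of_a_kind hand)

-- ===== LEMMAS AND PROOFS =====

-- A's "if card in cards: cards[card] += 1 else: cards[card] = 1" is one modify step
lemma stepA_ne (d : PySem.Dict Char Int) (j : Int) (c : Char) (h : ¬ c = 'J') :
    (if c = 'J' then (d, j + 1)
     else if d.contains c then (d.modify c 0 (· + 1), j)
     else (d.insert c 1, j))
    = (d.modify c 0 (· + 1), j) := by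
  by_cases hc : d.contains c
  · simp [h, hc]
  · have h2 : d.get? c = none := by
      rw [PySem.Dict.contains_eq_isSome_get?] at hc
      simpa using hc
    simp [h, hc, PySem.Dict.modify, PySem.Dict.insert, PySem.Dict.getD, h2]

-- A's loop is the counter of the non-'J' cards paired with the joker tally
lemma foldA_eq (l : List Char) (d : PySem.Dict Char Int) (j : Int) :
    l.foldl
      (fun (st : PySem.Dict Char Int × Int) card =>
        if card = 'J' then (st.1, st.2 + 1)
        else if st.1.contains card then (st.1.modify card 0 (· + 1), st.2)
        else (st.1.insert card 1, st.2))
      (d, j)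
    = ((l.filter (fun c => c ≠ 'J')).foldl (fun d x => d.modify x 0 (· + 1)) d,
       j + (l.count 'J' : Int)) := by
  induction l generalizing d j with
  | nil => simp
  | cons c l ih =>
    by_cases h : c = 'J'
    · subst h
      simp only [List.foldl_cons, ih, List.filter_cons, List.count_cons]
      simp
      omega
    · simp only [List.foldl_cons, stepA_ne d j c h, ih, List.filter_cons, List.count_cons]
      simp [h]

-- membership of v among the counter's values, in terms of counts over the original hand
lemma counter_values_contains (cs : List Char) (v : Int) :
    ((PySem.Dict.counter (cs.filter (fun c => c ≠ 'J'))).values.contains v = true)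
    ↔ ∃ k, k ∈ cs ∧ k ≠ 'J' ∧ (cs.count k : Int) = v := by
  rw [PySem.Dict.values_eq_map_keys _ (PySem.Dict.nodup_keys_counter _) 0,
      PySem.Dict.keys_counter,
      List.map_congr_left (fun k _ => PySem.Dict.getD_counter (cs.filter (fun c => c ≠ 'J')) k)]
  simp [List.mem_map, PySem.Set.mem_ofList, List.mem_filter]
  constructor
  · rintro ⟨k, ⟨hk, hne⟩, hv⟩
    refine ⟨k, hk, by simpa using hne, ?_⟩
    simpa [hne] using hv
  · rintro ⟨k, hk, hne, hv⟩
    exact ⟨k, ⟨hk, by simpa using hne⟩, by simpa [hne] using hv⟩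

-- A's early-return chain as one disjunction
lemma chain5 (a b c d : Bool) (e : Prop) [Decidable e] :
    (if a then some true else if b then some true else if c then some true
     else if d then some true else if e then some true else (none : Option Bool))
    = if (a || b || c || d || decide e) then some true else none := by
  by_cases he : e <;> cases a <;> cases b <;> cases c <;> cases d <;> simp [he]

-- the threshold table collapsed into one interval test
lemma conds_iff (cs : List Char) :
    (let j : Int := (cs.count 'J' : Int)
     let E : Int → Prop := fun v => ∃ k, k ∈ cs ∧ k ≠ 'J' ∧ (cs.count k : Int) = v
     (E 5 ∨ (E 4 ∧ j > 0) ∨ (E 3 ∧ j > 1) ∨ (E 2 ∧ j > 2) ∨ j > 3)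
     ↔ (j > 3 ∨ ∃ k, k ∈ cs ∧ k ≠ 'J' ∧ 5 - j ≤ (cs.count k : Int) ∧ (cs.count k : Int) ≤ 5)) := by
  intro j E
  have hj : (0:Int) ≤ j := Int.natCast_nonneg _
  constructor
  · rintro (⟨k,hk,hne,hv⟩ | ⟨⟨k,hk,hne,hv⟩,hj'⟩ | ⟨⟨k,hk,hne,hv⟩,hj'⟩ | ⟨⟨k,hk,hne,hv⟩,hj'⟩ | hj')
    · exact Or.inr ⟨k, hk, hne, by omega⟩
    · exact Or.inr ⟨k, hk, hne, by omega⟩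
    · exact Or.inr ⟨k, hk, hne, by omega⟩
    · exact Or.inr ⟨k, hk, hne, by omega⟩
    · exact Or.inl hj'
  · rintro (hj' | ⟨k, hk, hne, h1, h2⟩)
    · right; right; right; right; exact hj'
    · by_cases h4 : j > 3
      · right; right; right; right; exact h4
      · have hge : 2 ≤ cs.count k := by omega
        have hle : cs.count k ≤ 5 := by exact_mod_cast h2
        interval_cases h : cs.count k
        · right; right; right; left; exact ⟨⟨k,hk,hne, by omega⟩, by omega⟩
        · right; right; left; exact ⟨⟨k,hk,hne, by omega⟩, by omega⟩
        · right; left; exact ⟨⟨k,hk,hne, by omega⟩, by omega⟩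
        · left; exact ⟨k,hk,hne, by omega⟩

-- the RLE fold never touches the accumulator below its top element
lemma foldl_runStep_cons (t : List Char) (a : Char × Int) (acc : List (Char × Int)) :
    t.foldl runStep (a :: acc) = t.foldl runStep [a] ++ acc := by
  induction t generalizing a acc with
  | nil => simp
  | cons d t' ih =>
    obtain ⟨c0, n⟩ := a
    by_cases h : c0 = d
    · subst h
      simp only [List.foldl_cons, runStep, if_true]
      exact ih _ _
    · simp only [List.foldl_cons, runStep, if_neg h]
      rw [ih, ih ⟨d, 1⟩ [(c0, n)], List.append_assoc]
      rfl

-- a block of equal cards only increments the top run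
lemma foldl_runStep_replicate (m : Nat) (c : Char) (k : Int) (t : List Char) :
    (List.replicate m c ++ t).foldl runStep [(c, k)] = t.foldl runStep [(c, k + m)] := by
  induction m generalizing k with
  | zero => simp
  | succ m ih =>
    simp only [List.replicate_succ, List.cons_append, List.foldl_cons, runStep, if_true]
    rw [ih]
    have h5 : k + 1 + (m : Int) = k + ((m + 1 : Nat) : Int) := by push_cast; omega
    rw [h5]

-- a sorted nonempty list starts with the full block of its head
lemma sorted_head_block (c : Char) (r : List Char) (hs : List.Pairwise (· ≤ ·) (c :: r)) :
    ∃ m t, c :: r = List.replicate (m + 1) c ++ t ∧ c ∉ t ∧ List.Pairwise (· ≤ ·) t := by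
  induction r generalizing c with
  | nil => exact ⟨0, [], by simp, by simp, List.Pairwise.nil⟩
  | cons d r' ih =>
    by_cases h : d = c
    · subst h
      obtain ⟨m, t, heq, hnt, hst⟩ := ih d ((List.pairwise_cons.mp hs).2)
      exact ⟨m + 1, t, by simpa [List.replicate_succ] using congrArg (d :: ·) heq, hnt, hst⟩
    · refine ⟨0, d :: r', by simp, ?_, (List.pairwise_cons.mp hs).2⟩
      intro hc
      rcases List.mem_cons.mp hc with h1 | h1
      · exact h h1.symm
      · have hcd : c ≤ d := (List.pairwise_cons.mp hs).1 d (by simp)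
        have hdc : d ≤ c := (List.pairwise_cons.mp (List.pairwise_cons.mp hs).2).1 c h1
        exact h (le_antisymm hdc hcd)

-- the non-'J' cards and the 'J's split the hand's length
lemma filter_len_count (cs : List Char) :
    (cs.filter (fun c => c ≠ 'J')).length + cs.count 'J' = cs.length := by
  induction cs with
  | nil => simp
  | cons x xs ih =>
    by_cases hx : x = 'J'
    · subst hx
      have h1 : ('J' :: xs).filter (fun c => c ≠ 'J') = xs.filter (fun c => c ≠ 'J') := by simp
      have h2 : ('J' :: xs).count 'J' = xs.count 'J' + 1 := by simp
      rw [h1, h2, List.length_cons]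
      omega
    · have h1 : (x :: xs).filter (fun c => c ≠ 'J') = x :: xs.filter (fun c => c ≠ 'J') := by
        simp [hx]
      have h2 : (x :: xs).count 'J' = xs.count 'J' := by simp [hx]
      rw [h1, h2, List.length_cons, List.length_cons]
      omega

-- the runs of a sorted list are exactly (card, its count), one per distinct card
lemma runs_spec (l : List Char) (hs : List.Pairwise (· ≤ ·) l) :
    (∀ p ∈ l.foldl runStep ([] : List (Char × Int)), p.1 ∈ l ∧ p.2 = (l.count p.1 : Int)) ∧
    (∀ c ∈ l, ∃ n, (c, n) ∈ l.foldl runStep ([] : List (Char × Int))) := by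
  induction hn : l.length using Nat.strong_induction_on generalizing l with
  | _ n ih =>
    cases l with
    | nil => simp
    | cons c r =>
      obtain ⟨m, t, heq, hnt, hst⟩ := sorted_head_block c r hs
      have hfold : (c :: r).foldl runStep [] = t.foldl runStep [] ++ [(c, (m + 1 : Int))] := by
        rw [heq, List.replicate_succ, List.cons_append, List.foldl_cons]
        show (List.replicate m c ++ t).foldl runStep [(c, 1)] = _
        rw [foldl_runStep_replicate]
        cases t with
        | nil =>
          simp only [List.foldl_nil, List.nil_append]
          have h5 : (1 : Int) + (m : Int) = (m : Int) + 1 := by omega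
          rw [h5]
        | cons d t' =>
          have hdc : ¬ d = c := fun h => hnt (h ▸ List.mem_cons_self)
          simp only [List.foldl_cons, runStep]
          have h5 : (1 : Int) + (m : Int) = (m : Int) + 1 := by omega
          rw [if_neg (fun h => hdc h.symm), foldl_runStep_cons, h5]
      have hlt : t.length < n := by
        have h1 := congrArg List.length heq
        simp only [List.length_cons, List.length_append, List.length_replicate] at h1
        simp only [List.length_cons] at hn
        omega
      obtain ⟨iha, ihb⟩ := ih t.length hlt t hst rfl
      have hcount_t : ∀ k, k ∈ t → (c :: r).count k = t.count k := by
        intro k hk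
        have hkc : k ≠ c := fun h => hnt (h ▸ hk)
        rw [heq, List.count_append]
        have hz : (List.replicate (m + 1) c).count k = 0 := by
          simp [List.count_replicate, Ne.symm hkc]
        omega
      have hcount_c : (c :: r).count c = m + 1 := by
        rw [heq, List.count_append, List.count_eq_zero_of_not_mem hnt]
        simp
      constructor
      · intro p hp
        rw [hfold] at hp
        rcases List.mem_append.mp hp with hp | hp
        · obtain ⟨h1, h2⟩ := iha p hp
          have hmem : p.1 ∈ c :: r := by
            rw [heq]; exact List.mem_append.mpr (Or.inr h1)
          exact ⟨hmem, by rw [hcount_t p.1 h1]; exact h2⟩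
        · simp only [List.mem_singleton] at hp
          subst hp
          exact ⟨List.mem_cons_self, by simp [hcount_c]⟩
      · intro k hk
        rw [hfold]
        by_cases hkc : k = c
        · subst hkc
          exact ⟨(m + 1 : Int), List.mem_append.mpr (Or.inr (by simp))⟩
        · have hkt : k ∈ t := by
            rw [heq] at hk
            rcases List.mem_append.mp hk with h | h
            · exact absurd (List.eq_of_mem_replicate h) hkc
            · exact h
          obtain ⟨nn, hnn⟩ := ihb k hkt
          exact ⟨nn, List.mem_append.mpr (Or.inl hnn)⟩

-- ===== VERDICT (by name: the statement is the Claim_ definition above) =====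
theorem has_five_of_a_kind_spec : Claim_equal_has_five_of_a_kind := by
  intro hand _
  show has_five_of_a_kind hand = has_five_of_a_kind_alt hand
  unfold has_five_of_a_kind has_five_of_a_kind_alt
  simp only [foldA_eq, ← PySem.Dict.counter_eq_foldl, zero_add]
  rw [chain5]
  set cs := hand.toList with hcs
  set rest := PySem.List.sorted (cs.filter (fun c => c ≠ 'J')) (fun c => c) false with hrest
  have hperm : rest.Perm (cs.filter (fun c => c ≠ 'J')) := PySem.List.sorted_perm _ _ _
  have hsorted : List.Pairwise (· ≤ ·) rest :=
    PySem.List.sorted_pairwise (cs.filter (fun c => c ≠ 'J')) (fun c => c)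
  -- jokers in B equals the 'J'-count
  have hlen : (cs.length : Int) - (rest.length : Int) = (cs.count 'J' : Int) := by
    have h1 : rest.length = (cs.filter (fun c => c ≠ 'J')).length := hperm.length_eq
    have h2 : (cs.filter (fun c => c ≠ 'J')).length + cs.count 'J' = cs.length :=
      filter_len_count cs
    omega
  rw [hlen]
  obtain ⟨hA, hB⟩ := runs_spec rest hsorted
  have hmem : ∀ k, k ∈ rest ↔ (k ∈ cs ∧ k ≠ 'J') := by
    intro k
    rw [hperm.mem_iff, List.mem_filter]
    simp
  have hcnt : ∀ k, k ∈ rest → rest.count k = cs.count k := by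
    intro k hk
    rw [hperm.count_eq, List.count_filter]
    simp [((hmem k).mp hk).2]
  -- B's run scan ↔ ∃ card in the interval
  have hany : ((rest.foldl runStep []).reverse.any
      (fun p => decide (5 - (cs.count 'J' : Int) ≤ p.2) && decide (p.2 ≤ 5)) = true)
      ↔ ∃ k, k ∈ cs ∧ k ≠ 'J' ∧ 5 - (cs.count 'J' : Int) ≤ (cs.count k : Int) ∧ (cs.count k : Int) ≤ 5 := by
    simp only [List.any_eq_true, List.mem_reverse, Bool.and_eq_true, decide_eq_true_eq]
    constructor
    · rintro ⟨p, hp, h1, h2⟩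
      obtain ⟨hmem', hcount'⟩ := hA p hp
      obtain ⟨hin, hne⟩ := (hmem p.1).mp hmem'
      refine ⟨p.1, hin, hne, ?_, ?_⟩
      · rw [← hcnt p.1 hmem', ← hcount']; exact h1
      · rw [← hcnt p.1 hmem', ← hcount']; exact h2
    · rintro ⟨k, hin, hne, h1, h2⟩
      have hkm : k ∈ rest := (hmem k).mpr ⟨hin, hne⟩
      obtain ⟨nn, hnn⟩ := hB k hkm
      refine ⟨(k, nn), hnn, ?_, ?_⟩
      · have := (hA (k, nn) hnn).2
        simp only at this
        rw [this, hcnt k hkm]; exact h1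
      · have := (hA (k, nn) hnn).2
        simp only at this
        rw [this, hcnt k hkm]; exact h2
  -- assemble
  have hc := conds_iff cs
  simp only at hc
  have hOr : (((PySem.Dict.counter (cs.filter (fun c => c ≠ 'J'))).values.contains 5 ||
        ((PySem.Dict.counter (cs.filter (fun c => c ≠ 'J'))).values.contains 4 && decide ((cs.count 'J' : Int) > 0)) ||
        ((PySem.Dict.counter (cs.filter (fun c => c ≠ 'J'))).values.contains 3 && decide ((cs.count 'J' : Int) > 1)) ||
        ((PySem.Dict.counter (cs.filter (fun c => c ≠ 'J'))).values.contains 2 && decide ((cs.count 'J' : Int) > 2)) ||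
        decide ((cs.count 'J' : Int) > 3)) = true)
      ↔ ((cs.count 'J' : Int) > 3 ∨
          ((rest.foldl runStep []).reverse.any
            (fun p => decide (5 - (cs.count 'J' : Int) ≤ p.2) && decide (p.2 ≤ 5)) = true)) := by
    rw [hany]
    simp only [Bool.or_eq_true, Bool.and_eq_true, decide_eq_true_eq, counter_values_contains]
    rw [or_assoc, or_assoc, or_assoc, hc]
  by_cases hj : (cs.count 'J' : Int) > 3
  · rw [if_pos (hOr.mpr (Or.inl hj)), if_pos hj]
  · rw [if_neg hj]
    cases hb : ((rest.foldl runStep []).reverse.any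
        (fun p => decide (5 - (cs.count 'J' : Int) ≤ p.2) && decide (p.2 ≤ 5))) with
    | true =>
      rw [if_pos (hOr.mpr (Or.inr hb))]
      simp
    | false =>
      rw [if_neg (fun hcontra => by
        rcases hOr.mp hcontra with h | h
        · exact hj h
        · rw [h] at hb; exact Bool.noConfusion hb)]
      simp
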